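-- pv_equiv track=rewrite | github.com/mjlee76/Algorithm_Python | 2Programmers/택배상자꺼내기.py | solution
-- ===== SOURCE A (Python) =====
-- def solution(n, w, num):
--     answer = 0
--     # 높이
--     h = n//w + 1
--     # 박스 번호
--     x = 1
--
--     storage = []
--
--     for i in range(h):
--         temp = []
--         for j in range(w):
--             if x <= n:
--                 temp.append(x)
--                 x += 1
--             else:
--                 temp.append(0)
--
--         if i % 2 == 0:
--             storage.append(temp)
--         else:
--             temp.reverse()
--             storage.append(temp)
--
--     for i in range(len(storage)):
--         for j in range(len(storage[0])):
--             if storage[i][j] == num: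
--                 d = i
--                 while d < h:
--                     if storage[d][j] != 0: # 상자 존재하면 +1
--                         answer += 1
--                         d += 1
--                     else:                  # 상자 없을때(0일때) break
--                         break
--
--     return answer
-- ===== SOURCE B (Python) =====
-- def solution(n, w, num):
--     # Arithmetic re-implementation: locate num's cell directly, then count the
--     # boxes stacked on top of it, without building the grid.
--     if w < 1 or num < 1 or num > n:
--         return 0  # empty grid or num not among the boxes
--     i, k = divmod(num - 1, w)          # row of num, offset within its row
--     j = k if i % 2 == 0 else w - 1 - k # column after the zigzag reversal
--     h = n // w + 1
--     ans = 0
--     for d in range(i, h):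
--         v = d * w + (j + 1 if d % 2 == 0 else w - j)  # box number at (d, j)
--         if v <= n:
--             ans += 1
--         else:
--             break
--     return ans
-- ===== Notes on version B (the rewrite author's own statement) =====
-- stated objective: faster
-- what changed: B computes num's row and column by floor division/modulo arithmetic and walks only the single column below num, instead of materialising the whole zigzag grid and scanning every cell for the match; Pre_ excludes only w = 0, where A raises ZeroDivisionError.
import Mathlib
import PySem

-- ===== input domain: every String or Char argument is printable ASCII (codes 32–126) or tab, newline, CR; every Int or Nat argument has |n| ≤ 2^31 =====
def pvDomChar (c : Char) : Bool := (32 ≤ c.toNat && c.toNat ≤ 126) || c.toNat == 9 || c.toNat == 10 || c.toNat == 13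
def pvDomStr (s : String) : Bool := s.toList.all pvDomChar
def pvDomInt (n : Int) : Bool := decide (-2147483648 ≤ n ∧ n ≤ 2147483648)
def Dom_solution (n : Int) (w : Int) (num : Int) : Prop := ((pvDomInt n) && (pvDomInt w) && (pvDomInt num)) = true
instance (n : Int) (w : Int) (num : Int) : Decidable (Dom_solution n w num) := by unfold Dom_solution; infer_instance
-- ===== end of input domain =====

-- B replaces A's build-the-whole-grid-and-scan-it approach by arithmetic: it
-- locates num's row and column directly and only walks the single column below.

-- ===== PORT A =====
-- inner 'for j in range(w)' loop body: append x (and bump it) while x <= n, else append 0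
-- (a Python list is a dynamic array: .append is ported as Array.push)
def pvRowStep (n : Int) (st : Array Int × Int) (_j : Int) : Array Int × Int :=
  if st.2 ≤ n then (st.1.push st.2, st.2 + 1) else (st.1.push 0, st.2)

-- outer 'for i in range(h)' loop body: build temp, append it (reversed on odd rows)
def pvOuterStep (n w : Int) (st : Array (Array Int) × Int) (i : Int) : Array (Array Int) × Int :=
  let t := (PySem.List.pyRange 0 w 1).foldl (pvRowStep n) (#[], st.2)
  if PySem.Int.mod i 2 = 0 then (st.1.push t.1, t.2) else (st.1.push t.1.reverse, t.2)

-- storage[d][j]; A only reads it at indices that are in range (0 ≤ d, j)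
def pvCell (storage : Array (Array Int)) (d j : Int) : Int :=
  (storage.getD d.toNat #[]).getD j.toNat 0

-- the 'while d < h' loop: 'answer += 1; d += 1' while the cell below is non-zero
def pvWhile (storage : Array (Array Int)) (h j d ans : Int) : Int :=
  if hd : d < h then
    (if pvCell storage d j ≠ 0 then pvWhile storage h j (d + 1) (ans + 1) else ans)
  else ans
termination_by (h - d).toNat
decreasing_by omega

def solution (n : Int) (w : Int) (num : Int) : Int :=
  let h := PySem.Int.floordiv n w + 1
  let storage := ((PySem.List.pyRange 0 h 1).foldl (pvOuterStep n w) (#[], 1)).1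
  (PySem.List.pyRange 0 (storage.size : Int) 1).foldl (fun answer i =>
    (PySem.List.pyRange 0 ((storage.getD 0 #[]).size : Int) 1).foldl
      (fun answer j =>
        if pvCell storage i j = num then pvWhile storage h j i answer else answer)
      answer) 0

-- ===== PORT B =====
-- the 'for d in range(i, h)' loop with break: 'ans += 1' while the box exists
def pvAltCount (n w j h d ans : Int) : Int :=
  if hd : d < h then
    (if d * w + (if PySem.Int.mod d 2 = 0 then j + 1 else w - j) ≤ n then
      pvAltCount n w j h (d + 1) (ans + 1)
    else ans)
  else ans
termination_by (h - d).toNat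
decreasing_by omega

def solution_alt (n : Int) (w : Int) (num : Int) : Int :=
  if w < 1 ∨ num < 1 ∨ n < num then 0
  else
    let i := PySem.Int.floordiv (num - 1) w
    let k := PySem.Int.mod (num - 1) w
    let j := if PySem.Int.mod i 2 = 0 then k else w - 1 - k
    let h := PySem.Int.floordiv n w + 1
    pvAltCount n w j h i 0

-- ===== PRECONDITION & SPEC =====
-- Pre_ excludes only w = 0, where A raises ZeroDivisionError on 'n//w'.
def Pre_solution (n : Int) (w : Int) (num : Int) : Prop := w ≠ 0
instance (n : Int) (w : Int) (num : Int) : Decidable (Pre_solution n w num) := by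
  unfold Pre_solution; infer_instance

def pvWitness_solution : Int × Int × Int := (8, 3, 5)

def Spec_solution (n : Int) (w : Int) (num : Int) (out : Int) : Prop := out = solution_alt n w num
instance (n : Int) (w : Int) (num : Int) (out : Int) : Decidable (Spec_solution n w num out) := by
  unfold Spec_solution; infer_instance

-- ===== CLAIM (what is proved, stated in full; the proofs are below) =====
def Claim_equal_solution : Prop := ∀ (n : Int) (w : Int) (num : Int), Dom_solution n w num → Pre_solution n w num → Spec_solution n w num (solution n w num)

-- ===== LEMMAS AND PROOFS =====
-- proof-side list model of port A (Python lists as Lean lists)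
-- inner 'for j in range(w)' loop body: append x (and bump it) while x <= n, else append 0
def pvRowStepL (n : Int) (st : List Int × Int) (_j : Int) : List Int × Int :=
  if st.2 ≤ n then (st.1 ++ [st.2], st.2 + 1) else (st.1 ++ [0], st.2)

-- outer 'for i in range(h)' loop body: build temp, append it (reversed on odd rows)
def pvOuterStepL (n w : Int) (st : List (List Int) × Int) (i : Int) : List (List Int) × Int :=
  let t := (PySem.List.pyRange 0 w 1).foldl (pvRowStepL n) ([], st.2)
  if PySem.Int.mod i 2 = 0 then (st.1 ++ [t.1], t.2) else (st.1 ++ [t.1.reverse], t.2)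

-- storage[d][j]; A only reads it at indices that are in range
def pvCellL (storage : List (List Int)) (d j : Int) : Int :=
  PySem.List.pyGetD (PySem.List.pyGetD storage d []) j 0

-- the 'while d < h' loop: 'answer += 1; d += 1' while the cell below is non-zero
def pvWhileL (storage : List (List Int)) (h j d ans : Int) : Int :=
  if hd : d < h then
    (if pvCellL storage d j ≠ 0 then pvWhileL storage h j (d + 1) (ans + 1) else ans)
  else ans
termination_by (h - d).toNat
decreasing_by omega

def solutionL (n : Int) (w : Int) (num : Int) : Int :=
  let h := PySem.Int.floordiv n w + 1
  let storage := ((PySem.List.pyRange 0 h 1).foldl (pvOuterStepL n w) ([], 1)).1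
  (PySem.List.pyRange 0 (storage.length : Int) 1).foldl (fun answer i =>
    (PySem.List.pyRange 0 ((PySem.List.pyGetD storage 0 []).length : Int) 1).foldl
      (fun answer j =>
        if pvCellL storage i j = num then pvWhileL storage h j i answer else answer)
      answer) 0


-- proof-side grid description
def pvBaseRow (n w : Int) (i : Nat) : List Int :=
  (List.range w.toNat).map (fun (j : Nat) => if (i:Int) * w + (j:Int) + 1 ≤ n then (i:Int) * w + (j:Int) + 1 else 0)

def pvRowSpec (n w : Int) (i : Nat) : List Int :=
  if i % 2 = 0 then pvBaseRow n w i else (pvBaseRow n w i).reverse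

def pvStorage (n w : Int) (h : Nat) : List (List Int) :=
  (List.range h).map (pvRowSpec n w)

theorem pv_map_range_succ {α : Type} (g : Nat → α) (m : Nat) :
    (List.range (m + 1)).map g = g 0 :: (List.range m).map (fun j => g (j + 1)) := by
  rw [List.range_succ_eq_map]
  simp [List.map_map, Function.comp_def]

theorem pvRow_fold (n : Int) (l : List Int) (acc : List Int) (x0 : Int) (hx : x0 ≤ n + 1) :
    l.foldl (pvRowStepL n) (acc, x0)
      = (acc ++ (List.range l.length).map (fun (j : Nat) => if x0 + (j : Int) ≤ n then x0 + (j : Int) else 0),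
         min (x0 + l.length) (n + 1)) := by
  induction l generalizing acc x0 with
  | nil => simp; omega
  | cons a t ih =>
    simp only [List.foldl_cons, pvRowStepL]
    by_cases hc : x0 ≤ n
    · rw [if_pos hc, ih _ _ (by omega)]
      rw [List.length_cons, pv_map_range_succ]
      refine Prod.ext ?_ ?_
      · simp only [List.append_assoc, List.singleton_append]
        congr 2
        · simp [hc]
        · apply List.map_congr_left; intro j _
          push_cast
          split_ifs <;> omega
      · simp only []; push_cast; omega
    · rw [if_neg hc, ih _ _ (by omega)]
      rw [List.length_cons, pv_map_range_succ]
      refine Prod.ext ?_ ?_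
      · simp only [List.append_assoc, List.singleton_append]
        congr 2
        · simp; omega
        · apply List.map_congr_left; intro j _
          push_cast
          split_ifs <;> omega
      · simp only []; push_cast; omega

theorem pvOuter_fold (n w : Int) (hw : 1 ≤ w) (m i0 : Nat) (acc : List (List Int)) :
    (PySem.List.pyRange (i0 : Int) ((i0 : Int) + m)).foldl (pvOuterStepL n w)
        (acc, min ((i0 : Int) * w) n + 1)
      = (acc ++ (List.range m).map (fun t => pvRowSpec n w (i0 + t)),
         min (((i0 : Int) + m) * w) n + 1) := by
  induction m generalizing i0 acc with
  | zero => rw [PySem.List.pyRange_one_eq_nil (by simp)]; simp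
  | succ m ih =>
    rw [PySem.List.pyRange_one_cons (by push_cast; omega), List.foldl_cons]
    have hstep : pvOuterStepL n w (acc, min ((i0 : Int) * w) n + 1) (i0 : Int)
        = (acc ++ [pvRowSpec n w i0], min (((i0 : Int) + 1) * w) n + 1) := by
      unfold pvOuterStepL
      rw [pvRow_fold n _ _ _ (by omega)]
      have hlen : ((PySem.List.pyRange 0 w 1).length : Int) = w := by
        rw [PySem.List.length_pyRange_one]; omega
      have hrow : (List.range (PySem.List.pyRange 0 w 1).length).map
            (fun (j : Nat) => if min ((i0 : Int) * w) n + 1 + (j : Int) ≤ n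
              then min ((i0 : Int) * w) n + 1 + (j : Int) else 0)
          = pvBaseRow n w i0 := by
        unfold pvBaseRow
        rw [PySem.List.length_pyRange_one]
        have : (w - 0).toNat = w.toNat := by omega
        rw [this]
        apply List.map_congr_left; intro j _
        split_ifs <;> omega
      have hmod : PySem.Int.mod (i0 : Int) 2 = ((i0 % 2 : Nat) : Int) := by
        exact_mod_cast PySem.Int.mod_natCast i0 2
      have hx : min (min ((i0 : Int) * w) n + 1 + ((PySem.List.pyRange 0 w 1).length : Int)) (n + 1)
          = min (((i0 : Int) + 1) * w) n + 1 := by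
        rw [hlen]
        have hr : ((i0 : Int) + 1) * w = (i0 : Int) * w + w := by ring
        rw [min_def, min_def, min_def]
        split_ifs <;> linarith
      simp only [hrow, hx, hmod, pvRowSpec]
      by_cases hp : i0 % 2 = 0
      · have hp' : ((i0 % 2 : Nat) : Int) = 0 := by exact_mod_cast hp
        rw [if_pos hp', if_pos hp]; simp
      · have hp' : ¬ ((i0 % 2 : Nat) : Int) = 0 := by exact_mod_cast hp
        rw [if_neg hp', if_neg hp]; simp
    rw [hstep]
    have hb : (i0 : Int) + 1 = ((i0 + 1 : Nat) : Int) := by push_cast; ring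
    have hb2 : (i0 : Int) + (((m + 1 : Nat)) : Int) = ((i0 + 1 : Nat) : Int) + (m : Int) := by push_cast; ring
    rw [hb2, hb, ih]
    rw [pv_map_range_succ]
    refine Prod.ext ?_ ?_
    · simp only [List.append_assoc, List.singleton_append]
      have hmm : (List.range m).map (fun t => pvRowSpec n w (i0 + 1 + t))
           = (List.range m).map (fun j => pvRowSpec n w (i0 + (j + 1))) := by
        apply List.map_congr_left; intro t _; congr 1; omega
      rw [hmm]; simp
    · rfl

theorem pvStorage_eq (n w : Int) (hw : 1 ≤ w) (hn : 0 ≤ n) (h : Int) (hh : 0 ≤ h) :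
    ((PySem.List.pyRange 0 h).foldl (pvOuterStepL n w) ([], 1)).1 = pvStorage n w h.toNat := by
  have e := pvOuter_fold n w hw h.toNat 0 []
  have c1 : (((0:Nat)) : Int) + (h.toNat : Int) = h := by omega
  have c2 : min ((((0:Nat)) : Int) * w) n + 1 = 1 := by
    simp [min_eq_left hn]
  rw [c1, c2] at e
  have c3 : (((0:Nat)) : Int) = (0 : Int) := rfl
  rw [c3] at e
  rw [e]
  simp [pvStorage]

theorem pvRowSpec_length (n w : Int) (i : Nat) : (pvRowSpec n w i).length = w.toNat := by
  unfold pvRowSpec pvBaseRow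
  split_ifs <;> simp

theorem pvCellL_eq (n w : Int) (hw : 1 ≤ w) (h : Nat) (d j : Int)
    (hd0 : 0 ≤ d) (hdh : d < (h : Int)) (hj0 : 0 ≤ j) (hjw : j < w) :
    pvCellL (pvStorage n w h) d j
      = (if d * w + (if PySem.Int.mod d 2 = 0 then j + 1 else w - j) ≤ n
         then d * w + (if PySem.Int.mod d 2 = 0 then j + 1 else w - j) else 0) := by
  unfold pvCellL pvStorage
  rw [PySem.List.pyGetD_eq_getElem _ _ hd0 (by simpa using hdh)]
  rw [List.getElem_map, List.getElem_range]
  have hd : ((d.toNat : Nat) : Int) = d := by omega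
  have hmod : PySem.Int.mod d 2 = ((d.toNat % 2 : Nat) : Int) := by
    rw [← hd]; exact_mod_cast PySem.Int.mod_natCast d.toNat 2
  unfold pvRowSpec
  by_cases hp : d.toNat % 2 = 0
  · have hp' : PySem.Int.mod d 2 = 0 := by rw [hmod]; exact_mod_cast hp
    rw [if_pos hp, if_pos hp']
    unfold pvBaseRow
    rw [PySem.List.pyGetD_eq_getElem _ _ hj0 (by simp; omega)]
    rw [List.getElem_map, List.getElem_range]
    have hj : ((j.toNat : Nat) : Int) = j := by omega
    rw [hd, hj]
    split_ifs <;> omega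
  · have hp' : ¬ PySem.Int.mod d 2 = 0 := by rw [hmod]; exact_mod_cast hp
    rw [if_neg hp, if_neg hp']
    unfold pvBaseRow
    rw [PySem.List.pyGetD_eq_getElem _ _ hj0 (by simp; omega)]
    rw [List.getElem_reverse, List.getElem_map, List.getElem_range]
    have hc : (((w.toNat - 1 - j.toNat : Nat)) : Int) = w - 1 - j := by omega
    simp only [List.length_map, List.length_range]
    rw [hd, hc]
    split_ifs <;> omega

theorem pvWhileL_eq_alt (n w : Int) (hw : 1 ≤ w) (hn : 0 ≤ n) (j : Int)
    (hj0 : 0 ≤ j) (hjw : j < w) (fuel : Nat) :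
    ∀ (d ans : Int), 0 ≤ d → ((PySem.Int.floordiv n w + 1) - d).toNat ≤ fuel →
      pvWhileL (pvStorage n w (PySem.Int.floordiv n w + 1).toNat) (PySem.Int.floordiv n w + 1) j d ans
        = pvAltCount n w j (PySem.Int.floordiv n w + 1) d ans := by
  have hfd : 0 ≤ PySem.Int.floordiv n w := by
    rw [PySem.Int.le_floordiv_iff_mul_le (by omega)]; omega
  induction fuel with
  | zero =>
    intro d ans hd0 hfuel
    rw [pvWhileL, pvAltCount, dif_neg (by omega), dif_neg (by omega)]
  | succ fuel ih =>
    intro d ans hd0 hfuel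
    rw [pvWhileL, pvAltCount]
    by_cases hdh : d < PySem.Int.floordiv n w + 1
    · rw [dif_pos hdh, dif_pos hdh]
      rw [pvCellL_eq n w hw _ d j hd0 (by omega) hj0 hjw]
      have hv1 : 1 ≤ d * w + (if PySem.Int.mod d 2 = 0 then j + 1 else w - j) := by
        have := mul_nonneg hd0 (by omega : (0:Int) ≤ w)
        split_ifs <;> omega
      by_cases hvn : d * w + (if PySem.Int.mod d 2 = 0 then j + 1 else w - j) ≤ n
      · rw [if_pos hvn, if_pos hvn, if_pos (by omega)]
        rw [ih (d + 1) (ans + 1) (by omega) (by omega)]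
      · rw [if_neg hvn, if_neg hvn, if_neg (by omega)]
    · rw [dif_neg hdh, dif_neg hdh]

theorem pvWhileL_acc_fuel (storage : List (List Int)) (h j : Int) (fuel : Nat) :
    ∀ (d ans : Int), (h - d).toNat ≤ fuel →
      pvWhileL storage h j d ans = ans + pvWhileL storage h j d 0 := by
  induction fuel with
  | zero =>
    intro d ans hfuel
    have hd : ¬ d < h := by omega
    conv_lhs => rw [pvWhileL]
    conv_rhs => rw [pvWhileL]
    rw [dif_neg hd, dif_neg hd]
    omega
  | succ fuel ih =>
    intro d ans hfuel
    conv_lhs => rw [pvWhileL]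
    conv_rhs => rw [pvWhileL]
    by_cases hdh : d < h
    · rw [dif_pos hdh, dif_pos hdh]
      by_cases hc : pvCellL storage d j ≠ 0
      · rw [if_pos hc, if_pos hc, ih (d + 1) (ans + 1) (by omega), ih (d + 1) (0 + 1) (by omega)]
        omega
      · rw [if_neg hc, if_neg hc]
        omega
    · rw [dif_neg hdh, dif_neg hdh]
      omega

theorem pvWhileL_acc (storage : List (List Int)) (h j d ans : Int) :
    pvWhileL storage h j d ans = ans + pvWhileL storage h j d 0 :=
  pvWhileL_acc_fuel storage h j (h - d).toNat d ans (le_refl _)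

theorem pvEmptyRows (n w : Int) (hw : w ≤ 0) (l : List Int) :
    ∀ (acc : List (List Int)) (x : Int),
      l.foldl (pvOuterStepL n w) (acc, x) = (acc ++ List.replicate l.length [], x) := by
  induction l with
  | nil => intro acc x; simp
  | cons a t ih =>
    intro acc x
    rw [List.foldl_cons]
    have hstep : pvOuterStepL n w (acc, x) a = (acc ++ [[]], x) := by
      unfold pvOuterStepL
      rw [PySem.List.pyRange_one_eq_nil hw]
      simp only [List.foldl_nil]
      split_ifs <;> simp
    rw [hstep, ih]
    simp [List.replicate_succ]

theorem pv_sum_range_single (g : Nat → Int) (m k : Nat) (hk : k < m)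
    (hg : ∀ i, i < m → g i = if i = k then g k else 0) :
    ((List.range m).map g).sum = g k := by
  have h1 : ((List.range m).map g).sum = ∑ i ∈ Finset.range m, g i := rfl
  rw [h1]
  rw [Finset.sum_congr rfl (fun i hi => hg i (Finset.mem_range.mp hi))]
  rw [Finset.sum_ite_eq' (Finset.range m) k (fun _ => g k)]
  rw [if_pos (Finset.mem_range.mpr hk)]

theorem pv_double_single (T : Int → Int → Int) (H W i0 j0 : Nat)
    (hi : i0 < H) (hj : j0 < W)
    (hT : ∀ (i j : Nat), i < H → j < W →
      T (i : Int) (j : Int) = if i = i0 ∧ j = j0 then T (i0 : Int) (j0 : Int) else 0) :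
    ((List.range H).map ((fun (i : Int) =>
        ((List.range W).map ((fun (j : Int) => T i j) ∘ (fun (k : Nat) => (k : Int)))).sum)
      ∘ (fun (k : Nat) => (k : Int)))).sum
      = T (i0 : Int) (j0 : Int) := by
  have hgout : ∀ i, i < H →
      ((fun (i : Int) =>
        ((List.range W).map ((fun (j : Int) => T i j) ∘ (fun (k : Nat) => (k : Int)))).sum)
      ∘ (fun (k : Nat) => (k : Int))) i
      = if i = i0 then ((fun (i : Int) =>
        ((List.range W).map ((fun (j : Int) => T i j) ∘ (fun (k : Nat) => (k : Int)))).sum)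
      ∘ (fun (k : Nat) => (k : Int))) i0 else 0 := by
    intro i hiH
    by_cases hie : i = i0
    · subst hie; rw [if_pos rfl]
    · rw [if_neg hie]
      simp only [Function.comp_apply]
      apply List.sum_eq_zero
      intro x hx
      simp only [List.mem_map, List.mem_range, Function.comp_apply] at hx
      obtain ⟨j, hjW, rfl⟩ := hx
      rw [hT i j hiH hjW, if_neg (by tauto)]
  rw [pv_sum_range_single _ H i0 hi hgout]
  simp only [Function.comp_apply]
  rw [pv_sum_range_single _ W j0 hj ?hg2]
  case hg2 =>
    intro j hjW
    simp only [Function.comp_apply]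
    by_cases hje : j = j0
    · subst hje; rw [if_pos rfl]
    · rw [if_neg hje, hT i0 j hi hjW, if_neg (by tauto)]
  simp only [Function.comp_apply]

theorem pvCellL_match (n w num : Int) (hw : 1 ≤ w) (h1 : 1 ≤ num) (h2 : num ≤ n) (h : Nat)
    (i j : Int) (hi0 : 0 ≤ i) (hih : i < (h : Int)) (hj0 : 0 ≤ j) (hjw : j < w) :
    pvCellL (pvStorage n w h) i j = num ↔
      (i = PySem.Int.floordiv (num - 1) w ∧
       j = (if PySem.Int.mod (PySem.Int.floordiv (num - 1) w) 2 = 0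
            then PySem.Int.mod (num - 1) w
            else w - 1 - PySem.Int.mod (num - 1) w)) := by
  rw [pvCellL_eq n w hw h i j hi0 hih hj0 hjw]
  constructor
  · intro hc
    have hvn : i * w + (if PySem.Int.mod i 2 = 0 then j + 1 else w - j) ≤ n := by
      by_contra hno
      rw [if_neg hno] at hc
      omega
    rw [if_pos hvn] at hc
    have hr1 : 1 ≤ (if PySem.Int.mod i 2 = 0 then j + 1 else w - j) := by split_ifs <;> omega
    have hrw : (if PySem.Int.mod i 2 = 0 then j + 1 else w - j) ≤ w := by split_ifs <;> omega
    have hmul : (i + 1) * w = i * w + w := by ring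
    have hfd : PySem.Int.floordiv (num - 1) w = i := by
      rw [PySem.Int.floordiv_eq_iff_of_pos (by omega : (0:Int) < w)]
      omega
    have hmd := PySem.Int.floordiv_mul_add_mod (num - 1) w
    rw [hfd] at hmd
    refine ⟨hfd.symm, ?_⟩
    rw [hfd]
    by_cases hp : PySem.Int.mod i 2 = 0
    · rw [if_pos hp] at hc ⊢; omega
    · rw [if_neg hp] at hc ⊢; omega
  · rintro ⟨hi, hj⟩
    have hmd := PySem.Int.floordiv_mul_add_mod (num - 1) w
    have hm0 : 0 ≤ PySem.Int.mod (num - 1) w := PySem.Int.mod_nonneg _ (by omega)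
    subst hi
    by_cases hp : PySem.Int.mod (PySem.Int.floordiv (num - 1) w) 2 = 0
    · rw [if_pos hp] at hj ⊢
      subst hj
      rw [if_pos (by omega)]
      omega
    · rw [if_neg hp] at hj ⊢
      subst hj
      rw [if_pos (by omega)]
      omega

theorem pv_solutionL_eq (n w num : Int) (hw0 : w ≠ 0) : solutionL n w num = solution_alt n w num := by
  rcases lt_or_gt_of_ne hw0 with hwneg | hwpos
  · -- w ≤ -1 : every row of the grid is empty, both sides return 0
    simp only [solutionL, solution_alt]
    rw [if_pos (Or.inl (by omega))]
    rw [pvEmptyRows n w (by omega)]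
    simp only [List.nil_append]
    have hget : ∀ (L : Nat), (PySem.List.pyGetD (List.replicate L ([] : List Int)) 0 []).length = 0 := by
      intro L; cases L <;> simp [PySem.List.pyGetD_zero]
    simp only [hget, Nat.cast_zero, PySem.List.pyRange_one_eq_nil (le_refl (0:Int)), List.foldl_nil]
    exact List.foldl_fixed _
  · -- w ≥ 1
    have hw : 1 ≤ w := by omega
    rcases lt_or_ge n 0 with hn | hn
    · -- n < 0 : the grid has no rows, both sides return 0
      simp only [solutionL, solution_alt]
      have hguard : (w < 1 ∨ num < 1 ∨ n < num) := by
        by_cases hq : num < 1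
        · exact Or.inr (Or.inl hq)
        · exact Or.inr (Or.inr (by omega))
      rw [if_pos hguard]
      have hfd : PySem.Int.floordiv n w < 0 :=
        (PySem.Int.floordiv_lt_iff_lt_mul (by omega : (0:Int) < w)).mpr (by omega : n < 0 * w)
      rw [PySem.List.pyRange_one_eq_nil (by omega), List.foldl_nil]
      simp [PySem.List.pyRange_one_eq_nil (le_refl (0:Int))]
    · -- main case: w ≥ 1, 0 ≤ n
      have hfd0 : 0 ≤ PySem.Int.floordiv n w := by
        rw [PySem.Int.le_floordiv_iff_mul_le (by omega : (0:Int) < w)]; omega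
      simp only [solutionL]
      rw [pvStorage_eq n w hw hn (PySem.Int.floordiv n w + 1) (by omega)]
      have hlenS : (pvStorage n w (PySem.Int.floordiv n w + 1).toNat).length
          = (PySem.Int.floordiv n w + 1).toNat := by simp [pvStorage]
      have hH1 : 1 ≤ (PySem.Int.floordiv n w + 1).toNat := by omega
      have hrow0 : PySem.List.pyGetD (pvStorage n w (PySem.Int.floordiv n w + 1).toNat) 0 []
          = pvRowSpec n w 0 := by
        rw [PySem.List.pyGetD_eq_getElem _ _ (le_refl (0:Int)) (by rw [hlenS]; exact_mod_cast hH1)]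
        simp [pvStorage, List.getElem_map]
      simp only [hlenS, hrow0, pvRowSpec_length]
      have hinner : ∀ (a i : Int),
          (PySem.List.pyRange 0 ((w.toNat : Nat) : Int)).foldl
            (fun answer j => if pvCellL (pvStorage n w (PySem.Int.floordiv n w + 1).toNat) i j = num
              then pvWhileL (pvStorage n w (PySem.Int.floordiv n w + 1).toNat)
                (PySem.Int.floordiv n w + 1) j i answer
              else answer) a
          = a + ((PySem.List.pyRange 0 ((w.toNat : Nat) : Int)).map
              (fun j => if pvCellL (pvStorage n w (PySem.Int.floordiv n w + 1).toNat) i j = num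
                then pvWhileL (pvStorage n w (PySem.Int.floordiv n w + 1).toNat)
                  (PySem.Int.floordiv n w + 1) j i 0
                else 0)).sum := by
        intro a i
        have hfun : (fun (answer j : Int) =>
            if pvCellL (pvStorage n w (PySem.Int.floordiv n w + 1).toNat) i j = num
            then pvWhileL (pvStorage n w (PySem.Int.floordiv n w + 1).toNat)
              (PySem.Int.floordiv n w + 1) j i answer
            else answer)
            = fun answer j => answer +
                (if pvCellL (pvStorage n w (PySem.Int.floordiv n w + 1).toNat) i j = num
                 then pvWhileL (pvStorage n w (PySem.Int.floordiv n w + 1).toNat)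
                   (PySem.Int.floordiv n w + 1) j i 0
                 else 0) := by
          funext a' j'
          split_ifs
          · rw [pvWhileL_acc]
          · simp
        rw [hfun, PySem.List.foldl_add]
      simp only [hinner]
      rw [PySem.List.foldl_add]
      simp only [PySem.List.pyRange_zero_nat, List.map_map]
      have hHcast : ((((PySem.Int.floordiv n w + 1).toNat) : Nat) : Int)
          = PySem.Int.floordiv n w + 1 := by omega
      by_cases hnum : 1 ≤ num ∧ num ≤ n
      · obtain ⟨hn1, hn2⟩ := hnum
        have hmd := PySem.Int.floordiv_mul_add_mod (num - 1) w
        have hm0 : 0 ≤ PySem.Int.mod (num - 1) w := PySem.Int.mod_nonneg _ (by omega)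
        have hmw : PySem.Int.mod (num - 1) w < w := PySem.Int.mod_lt _ (by omega)
        have hi00 : 0 ≤ PySem.Int.floordiv (num - 1) w := by
          rw [PySem.Int.le_floordiv_iff_mul_le (by omega : (0:Int) < w)]; omega
        have hi0le : PySem.Int.floordiv (num - 1) w ≤ PySem.Int.floordiv n w := by
          rw [PySem.Int.le_floordiv_iff_mul_le (by omega : (0:Int) < w)]; omega
        have hj00 : 0 ≤ (if PySem.Int.mod (PySem.Int.floordiv (num - 1) w) 2 = 0
            then PySem.Int.mod (num - 1) w else w - 1 - PySem.Int.mod (num - 1) w) := by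
          split_ifs <;> omega
        have hj0w : (if PySem.Int.mod (PySem.Int.floordiv (num - 1) w) 2 = 0
            then PySem.Int.mod (num - 1) w else w - 1 - PySem.Int.mod (num - 1) w) < w := by
          split_ifs <;> omega
        have hci : (((PySem.Int.floordiv (num - 1) w).toNat : Nat) : Int)
            = PySem.Int.floordiv (num - 1) w := by omega
        have hcj : (((if PySem.Int.mod (PySem.Int.floordiv (num - 1) w) 2 = 0
            then PySem.Int.mod (num - 1) w
            else w - 1 - PySem.Int.mod (num - 1) w).toNat : Nat) : Int)
            = (if PySem.Int.mod (PySem.Int.floordiv (num - 1) w) 2 = 0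
              then PySem.Int.mod (num - 1) w
              else w - 1 - PySem.Int.mod (num - 1) w) := by omega
        rw [pv_double_single _ _ _ ((PySem.Int.floordiv (num - 1) w).toNat)
            ((if PySem.Int.mod (PySem.Int.floordiv (num - 1) w) 2 = 0
              then PySem.Int.mod (num - 1) w
              else w - 1 - PySem.Int.mod (num - 1) w).toNat)
            (by omega) (by omega) ?hT]
        case hT =>
          intro i j hiH hjW
          have hmatch := pvCellL_match n w num hw hn1 hn2 (PySem.Int.floordiv n w + 1).toNat
            (i : Int) (j : Int) (by omega) (by omega) (by omega)
            (by omega : (j : Int) < w)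
          have hmatch0 := pvCellL_match n w num hw hn1 hn2 (PySem.Int.floordiv n w + 1).toNat
            (((PySem.Int.floordiv (num - 1) w).toNat : Nat) : Int)
            (((if PySem.Int.mod (PySem.Int.floordiv (num - 1) w) 2 = 0
              then PySem.Int.mod (num - 1) w
              else w - 1 - PySem.Int.mod (num - 1) w).toNat : Nat) : Int)
            (by omega) (by omega) (by omega) (by omega)
          by_cases he : i = (PySem.Int.floordiv (num - 1) w).toNat ∧
              j = (if PySem.Int.mod (PySem.Int.floordiv (num - 1) w) 2 = 0
                then PySem.Int.mod (num - 1) w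
                else w - 1 - PySem.Int.mod (num - 1) w).toNat
          · rw [if_pos he]
            obtain ⟨he1, he2⟩ := he
            subst he1; subst he2; rfl
          · rw [if_neg he]
            have hnm : ¬ pvCellL (pvStorage n w (PySem.Int.floordiv n w + 1).toNat)
                (i : Int) (j : Int) = num := by
              rw [hmatch]
              rintro ⟨ha, hb⟩
              exact he ⟨by omega, by omega⟩
            rw [if_neg hnm]
        · -- the located term equals B's column walk
          have hpos := pvCellL_match n w num hw hn1 hn2 (PySem.Int.floordiv n w + 1).toNat
            (((PySem.Int.floordiv (num - 1) w).toNat : Nat) : Int)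
            (((if PySem.Int.mod (PySem.Int.floordiv (num - 1) w) 2 = 0
              then PySem.Int.mod (num - 1) w
              else w - 1 - PySem.Int.mod (num - 1) w).toNat : Nat) : Int)
            (by omega) (by omega) (by omega) (by omega)
          rw [if_pos (hpos.mpr ⟨by omega, by omega⟩)]
          rw [hci, hcj]
          rw [pvWhileL_eq_alt n w hw hn _ hj00 hj0w
            ((PySem.Int.floordiv n w + 1) - PySem.Int.floordiv (num - 1) w).toNat
            (PySem.Int.floordiv (num - 1) w) 0 hi00 (le_refl _)]
          simp only [solution_alt]
          rw [if_neg (show ¬(w < 1 ∨ num < 1 ∨ n < num) by omega)]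
          omega
      · -- num is not a box number: no cell matches with a non-zero count
        have hzero : ∀ x ∈ (List.range (PySem.Int.floordiv n w + 1).toNat).map
            ((fun (i : Int) =>
              ((List.range w.toNat).map ((fun (j : Int) =>
                if pvCellL (pvStorage n w (PySem.Int.floordiv n w + 1).toNat) i j = num
                then pvWhileL (pvStorage n w (PySem.Int.floordiv n w + 1).toNat)
                  (PySem.Int.floordiv n w + 1) j i 0
                else 0) ∘ (fun (k : Nat) => (k : Int)))).sum)
            ∘ (fun (k : Nat) => (k : Int))), x = 0 := by
          intro x hx
          simp only [List.mem_map, List.mem_range, Function.comp_apply] at hx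
          obtain ⟨i, hiH, rfl⟩ := hx
          apply List.sum_eq_zero
          intro y hy
          simp only [List.mem_map, List.mem_range, Function.comp_apply] at hy
          obtain ⟨j, hjW, rfl⟩ := hy
          have hcell := pvCellL_eq n w hw (PySem.Int.floordiv n w + 1).toNat
            (i : Int) (j : Int) (by omega) (by omega) (by omega) (by omega : (j : Int) < w)
          have hv1 : 1 ≤ (i : Int) * w +
              (if PySem.Int.mod (i : Int) 2 = 0 then (j : Int) + 1 else w - (j : Int)) := by
            have := mul_nonneg (by omega : (0:Int) ≤ (i : Int)) (by omega : (0:Int) ≤ w)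
            split_ifs <;> omega
          by_cases hc : pvCellL (pvStorage n w (PySem.Int.floordiv n w + 1).toNat)
              (i : Int) (j : Int) = num
          · rw [if_pos hc]
            have hc0 : pvCellL (pvStorage n w (PySem.Int.floordiv n w + 1).toNat)
                (i : Int) (j : Int) = 0 := by
              rw [hcell]
              rw [hcell] at hc
              split_ifs at hc ⊢ <;> omega
            rw [pvWhileL, dif_pos (by omega : (i : Int) < PySem.Int.floordiv n w + 1),
              if_neg (by simp [hc0])]
          · rw [if_neg hc]
        rw [List.sum_eq_zero hzero]
        simp only [solution_alt]
        rw [if_pos (show w < 1 ∨ num < 1 ∨ n < num by omega)]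
        omega


-- ===== bridge: the Array port computes the list model =====
theorem pvArr_getD_toList {α : Type} (a : Array α) (n : Nat) (d : α) :
    a.getD n d = a.toList.getD n d := by
  simp [Array.getD, List.getD]
  rcases Nat.lt_or_ge n a.size with h | h
  · simp [h, Array.getElem_toList]
  · simp [Nat.not_lt.mpr h, List.getElem?_eq_none (by simpa using h)]

theorem pv_pyGetD_nonneg {α : Type} (xs : List α) (i : Int) (d : α) (h : 0 ≤ i) :
    PySem.List.pyGetD xs i d = xs.getD i.toNat d := by
  conv_lhs => rw [show i = ((i.toNat : Nat) : Int) by omega, PySem.List.pyGetD_natCast]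

theorem pvRow_bridge (n : Int) (l : List Int) (acc : Array Int) (x : Int) :
    ((l.foldl (pvRowStep n) (acc, x)).1.toList, (l.foldl (pvRowStep n) (acc, x)).2)
      = l.foldl (pvRowStepL n) (acc.toList, x) := by
  induction l generalizing acc x with
  | nil => rfl
  | cons a t ih =>
    simp only [List.foldl_cons, pvRowStep, pvRowStepL]
    split_ifs with hc
    · rw [← Array.toList_push]; exact ih _ _
    · rw [← Array.toList_push]; exact ih _ _

theorem pvOuter_bridge (n w : Int) (l : List Int) (acc : Array (Array Int)) (x : Int) :
    ((l.foldl (pvOuterStep n w) (acc, x)).1.toList.map Array.toList,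
     (l.foldl (pvOuterStep n w) (acc, x)).2)
      = l.foldl (pvOuterStepL n w) (acc.toList.map Array.toList, x) := by
  induction l generalizing acc x with
  | nil => rfl
  | cons a t ih =>
    simp only [List.foldl_cons, pvOuterStep, pvOuterStepL]
    have hb := pvRow_bridge n (PySem.List.pyRange 0 w 1) #[] x
    have h1 := congrArg Prod.fst hb
    have h2 := congrArg Prod.snd hb
    simp only at h1 h2
    split_ifs with hp
    · rw [ih, h2]
      congr 2
      simp [h1]
    · rw [ih, h2]
      congr 2
      simp [Array.toList_reverse, h1]

theorem pvCell_bridge (storage : Array (Array Int)) (d j : Int) (hd : 0 ≤ d) (hj : 0 ≤ j) :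
    pvCell storage d j = pvCellL (storage.toList.map Array.toList) d j := by
  unfold pvCell pvCellL
  rw [pv_pyGetD_nonneg _ _ _ hd, pv_pyGetD_nonneg _ _ _ hj]
  rw [pvArr_getD_toList, pvArr_getD_toList]
  congr 1
  rw [show ([] : List Int) = Array.toList #[] from rfl, List.getD_map]

theorem pvWhile_bridge (storage : Array (Array Int)) (h j : Int) (hj : 0 ≤ j) (fuel : Nat) :
    ∀ (d ans : Int), 0 ≤ d → (h - d).toNat ≤ fuel →
      pvWhile storage h j d ans = pvWhileL (storage.toList.map Array.toList) h j d ans := by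
  induction fuel with
  | zero =>
    intro d ans hd0 hfuel
    rw [pvWhile, pvWhileL, dif_neg (by omega), dif_neg (by omega)]
  | succ fuel ih =>
    intro d ans hd0 hfuel
    rw [pvWhile, pvWhileL]
    by_cases hdh : d < h
    · rw [dif_pos hdh, dif_pos hdh, pvCell_bridge storage d j hd0 hj]
      by_cases hc : pvCellL (storage.toList.map Array.toList) d j ≠ 0
      · rw [if_pos hc, if_pos hc, ih (d + 1) (ans + 1) (by omega) (by omega)]
      · rw [if_neg hc, if_neg hc]
    · rw [dif_neg hdh, dif_neg hdh]

theorem pv_solution_bridge (n w num : Int) : solution n w num = solutionL n w num := by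
  simp only [solution, solutionL]
  have hb := pvOuter_bridge n w (PySem.List.pyRange 0 (PySem.Int.floordiv n w + 1) 1) #[] 1
  have h1 := congrArg Prod.fst hb
  simp only [Array.toList_empty, List.map_nil] at h1
  have hsize : (((PySem.List.pyRange 0 (PySem.Int.floordiv n w + 1) 1).foldl
      (pvOuterStep n w) (#[], 1)).1.size : Int)
      = (((PySem.List.pyRange 0 (PySem.Int.floordiv n w + 1) 1).foldl
      (pvOuterStepL n w) ([], 1)).1.length : Int) := by
    rw [← h1]; simp
  have hrow : ((((PySem.List.pyRange 0 (PySem.Int.floordiv n w + 1) 1).foldl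
      (pvOuterStep n w) (#[], 1)).1.getD 0 #[]).size : Int)
      = ((PySem.List.pyGetD (((PySem.List.pyRange 0 (PySem.Int.floordiv n w + 1) 1).foldl
      (pvOuterStepL n w) ([], 1)).1) 0 []).length : Int) := by
    rw [pv_pyGetD_nonneg _ _ _ (le_refl 0), ← h1, pvArr_getD_toList]
    rw [show ([] : List Int) = Array.toList #[] from rfl, List.getD_map]
    simp
  rw [hsize, hrow]
  apply PySem.List.foldl_congr_mem
  intro acc i hi
  have hi0 : 0 ≤ i := (PySem.List.mem_pyRange_one.mp hi).1
  apply PySem.List.foldl_congr_mem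
  intro acc' jj hjj
  have hj0 : 0 ≤ jj := (PySem.List.mem_pyRange_one.mp hjj).1
  rw [pvCell_bridge _ i jj hi0 hj0, h1,
    pvWhile_bridge _ _ jj hj0 ((PySem.Int.floordiv n w + 1) - i).toNat i acc' hi0 (le_refl _), h1]

-- ===== VERDICT (by name: the statement is the Claim_ definition above) =====
theorem solution_spec : Claim_equal_solution := by
  intro n w num _ hpre
  unfold Spec_solution
  exact (pv_solution_bridge n w num).trans (pv_solutionL_eq n w num hpre)
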